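-- pv_equiv track=rewrite | github.com/stop-zero/Programmers | 백준/Silver/10610. 30/30.py | find_largest_multiple
-- ===== SOURCE A (Python) =====
-- def find_largest_multiple(N):
--     digits = [int(d) for d in str(N)]
--     if 0 not in digits or sum(digits) % 3 != 0:
--         return -1
--
--     digits.sort(reverse=True)
--     largest_multiple = int(''.join(map(str, digits)))
--     if largest_multiple % 30 == 0:
--         return largest_multiple
--     else:
--         return -1
-- ===== SOURCE B (Python) =====
-- def find_largest_multiple(N):
--     count = [0] * 10
--     total = 0
--     for c in str(N):
--         d = int(c)
--         count[d] += 1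
--         total += d
--     if count[0] == 0 or total % 3 != 0:
--         return -1
--     digits_str = ''.join(str(d) * count[d] for d in range(9, -1, -1))
--     largest = int(digits_str)
--     if largest % 30 == 0:
--         return largest
--     else:
--         return -1
-- ===== Notes on version B (the rewrite author's own statement) =====
-- stated objective: alternative
-- what changed: Replaces the build-list-then-sort approach by a one-pass digit histogram (count and digit sum accumulated together), emitting the result string bucket-by-bucket from 9 down to 0 instead of sorting the digit list.
import Mathlib
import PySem

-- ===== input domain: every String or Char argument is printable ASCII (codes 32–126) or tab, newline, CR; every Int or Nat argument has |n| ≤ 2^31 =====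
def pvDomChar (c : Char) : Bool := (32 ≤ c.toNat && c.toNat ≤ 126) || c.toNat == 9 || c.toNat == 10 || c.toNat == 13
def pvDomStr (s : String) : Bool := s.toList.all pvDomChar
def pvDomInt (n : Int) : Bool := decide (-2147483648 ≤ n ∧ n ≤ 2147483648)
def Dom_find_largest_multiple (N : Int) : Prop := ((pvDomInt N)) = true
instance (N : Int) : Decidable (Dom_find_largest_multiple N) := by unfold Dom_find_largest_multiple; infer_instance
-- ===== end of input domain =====

-- B replaces A's build-list-then-sort by a one-pass digit histogram emitted bucket-by-bucket in descending digit order; equivalence proved for N ≥ 0 (both raise ValueError on negative N).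

-- ===== PORT A =====
-- int(c) for a one-character string (both Pythons apply int to single characters of str(N))
def pvDVal (c : Char) : Int := (PySem.Int.ofChars? [c]).getD 0

def find_largest_multiple (N : Int) : Int :=
  let digits := (PySem.Int.toChars N).map pvDVal          -- [int(d) for d in str(N)]
  if 0 ∉ digits ∨ PySem.Int.mod digits.sum 3 ≠ 0 then -1
  else
    let sortedDigits := PySem.List.sorted digits (fun x => x) true   -- digits.sort(reverse=True)
    -- int(''.join(map(str, digits))); the string is a nonempty digit string here, so int() returns (getD default unreachable)
    let largest := (PySem.Int.ofChars? (PySem.Chars.join [] (sortedDigits.map PySem.Int.toChars))).getD 0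
    if PySem.Int.mod largest 30 = 0 then largest else -1

-- ===== PORT B =====
-- loop body of Source B: d = int(c); count[d] += 1; total += d
def pvStep (st : List Int × Int) (d : Int) : List Int × Int :=
  (PySem.List.pySetD st.1 d (PySem.List.pyGetD st.1 d 0 + 1), st.2 + d)

def find_largest_multiple_alt (N : Int) : Int :=
  let st := (PySem.Int.toChars N).foldl (fun st c => pvStep st (pvDVal c))
    (List.replicate 10 0, 0)                              -- count = [0]*10; total = 0
  if PySem.List.pyGetD st.1 0 0 = 0 ∨ PySem.Int.mod st.2 3 ≠ 0 then -1
  else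
    -- the ''.join of str(d) * count[d] over the descending digit range;  str(d)*k ported at the char-list level as pyRepeat
    let s := PySem.Chars.join [] ((PySem.List.pyRange 9 (-1) (-1)).map
      (fun d => PySem.List.pyRepeat (PySem.Int.toChars d) (PySem.List.pyGetD st.1 d 0)))
    let largest := (PySem.Int.ofChars? s).getD 0
    if PySem.Int.mod largest 30 = 0 then largest else -1

-- ===== PRECONDITION & SPEC =====
-- Pre_ excludes negative N, on which both Pythons raise ValueError (int('-') while mapping over str(N)).
def Pre_find_largest_multiple (N : Int) : Prop := 0 ≤ N
instance (N : Int) : Decidable (Pre_find_largest_multiple N) := by unfold Pre_find_largest_multiple; infer_instance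
def pvWitness_find_largest_multiple : Int := 30

def Spec_find_largest_multiple (N : Int) (out : Int) : Prop := out = find_largest_multiple_alt N
instance (N : Int) (out : Int) : Decidable (Spec_find_largest_multiple N out) := by unfold Spec_find_largest_multiple; infer_instance

-- ===== CLAIM (what is proved, stated in full; the proofs are below) =====
def Claim_equal_find_largest_multiple : Prop := ∀ (N : Int), Dom_find_largest_multiple N → Pre_find_largest_multiple N → Spec_find_largest_multiple N (find_largest_multiple N)

-- ===== LEMMAS AND PROOFS =====

lemma char_eq_of_toNat_eq {c d : Char} (h : c.toNat = d.toNat) : c = d :=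
  Char.ext (UInt32.toNat_inj.mp h)

lemma pvDVal_bounds (c : Char) (h : c.isDigit = true) : 0 ≤ pvDVal c ∧ pvDVal c ≤ 9 := by
  simp [Char.isDigit, UInt32.le_iff_toNat_le] at h
  obtain ⟨h1, h2⟩ := h
  interval_cases h3 : c.toNat <;>
    first
    | rw [char_eq_of_toNat_eq (d := '0') h3]; decide
    | rw [char_eq_of_toNat_eq (d := '1') h3]; decide
    | rw [char_eq_of_toNat_eq (d := '2') h3]; decide
    | rw [char_eq_of_toNat_eq (d := '3') h3]; decide
    | rw [char_eq_of_toNat_eq (d := '4') h3]; decide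
    | rw [char_eq_of_toNat_eq (d := '5') h3]; decide
    | rw [char_eq_of_toNat_eq (d := '6') h3]; decide
    | rw [char_eq_of_toNat_eq (d := '7') h3]; decide
    | rw [char_eq_of_toNat_eq (d := '8') h3]; decide
    | rw [char_eq_of_toNat_eq (d := '9') h3]; decide

lemma digits_isDigit (N : Int) (h : 0 ≤ N) : ∀ c ∈ PySem.Int.toChars N, c.isDigit = true := by
  intro c hc
  unfold PySem.Int.toChars at hc
  rw [if_neg (by omega)] at hc
  exact Nat.isDigit_of_mem_toDigits (by norm_num) (by norm_num) hc

lemma join_nil_flatten (l : List (List Char)) : PySem.Chars.join [] l = l.flatten := by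
  induction l with
  | nil => simp [PySem.Chars.join_nil]
  | cons x t ih =>
    cases t with
    | nil => simp [PySem.Chars.join_singleton]
    | cons y u => rw [PySem.Chars.join_cons_cons]; simp_all

-- histogram loop invariant
lemma foldB_spec (D : List Int) (hD : ∀ d ∈ D, 0 ≤ d ∧ d ≤ 9) :
    ∀ (cnt : List Int) (t : Int), cnt.length = 10 →
    (D.foldl pvStep (cnt, t)).1.length = 10 ∧
    (∀ k : Nat, k < 10 →
      (D.foldl pvStep (cnt, t)).1.getD k 0 = cnt.getD k 0 + (D.count (k : Int) : Int)) ∧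
    (D.foldl pvStep (cnt, t)).2 = t + D.sum := by
  induction D with
  | nil => intro cnt t hlen; simp [hlen]
  | cons d T ih =>
    intro cnt t hlen
    obtain ⟨hd0, hd9⟩ := hD d (by simp)
    have hstep : pvStep (cnt, t) d = (cnt.set d.toNat (cnt[d.toNat]'(by omega) + 1), t + d) := by
      unfold pvStep
      rw [PySem.List.pySetD_of_nonneg _ _ hd0,
        PySem.List.pyGetD_eq_getElem _ _ hd0 (by rw [hlen]; omega)]
    have hlen' : (cnt.set d.toNat (cnt[d.toNat]'(by omega) + 1)).length = 10 := by
      simp [hlen]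
    obtain ⟨ih1, ih2, ih3⟩ := ih (fun x hx => hD x (by simp [hx])) _ (t + d) hlen'
    refine ⟨by simpa [hstep] using ih1, ?_, ?_⟩
    · intro k hk
      rw [List.foldl_cons, hstep]
      rw [ih2 k hk]
      have hdn : d.toNat < 10 := by omega
      have hget : (cnt.set d.toNat (cnt[d.toNat]'(by omega) + 1)).getD k 0
          = (if d.toNat = k then cnt[d.toNat]'(by omega) + 1 else cnt.getD k 0) := by
        rw [List.getD_eq_getElem _ _ (by simp [hlen]; omega), List.getElem_set]
        split_ifs with h
        · rfl
        · rw [List.getD_eq_getElem _ _ (by omega)]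
      rw [hget, List.count_cons]
      by_cases h : d.toNat = k
      · have hkd : (k : Int) = d := by omega
        rw [if_pos h, if_pos (by simp [hkd]), List.getD_eq_getElem _ _ (show k < cnt.length by omega)]
        have hck : cnt[d.toNat]'(by omega) = cnt[k]'(by omega) := by simp only [h]
        rw [hck]
        push_cast
        ring
        
      · rw [if_neg h, if_neg (by simp; omega)]
        push_cast; ring
    · rw [List.foldl_cons, hstep, ih3]
      simp; ring

-- the ascending bucket list is a permutation of D
lemma ascB_perm (D : List Int) (hD : ∀ d ∈ D, 0 ≤ d ∧ d ≤ 9) :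
    (([0,1,2,3,4,5,6,7,8,9] : List Int).flatMap
      (fun d => List.replicate (D.count d) d)).Perm D := by
  rw [List.perm_iff_count]
  intro a
  by_cases h : 0 ≤ a ∧ a ≤ 9
  · obtain ⟨h0, h9⟩ := h
    interval_cases a <;>
      simp [List.flatMap_cons, List.count_append, List.count_replicate]
  · have ha : a ∉ D := fun hm => h (hD a hm)
    rw [List.count_eq_zero.mpr ha]
    simp [List.flatMap_cons, List.count_append, List.count_replicate]
    omega

lemma ascB_pairwise (D : List Int) :
    (([0,1,2,3,4,5,6,7,8,9] : List Int).flatMap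
      (fun d => List.replicate (D.count d) d)).Pairwise (· ≤ ·) := by
  simp [List.flatMap_cons, List.pairwise_append, List.pairwise_replicate, List.mem_replicate]
  repeat' apply And.intro
  all_goals (intro _ b hb; omega)

lemma descB_eq_reverse (D : List Int) :
    (([9,8,7,6,5,4,3,2,1,0] : List Int).flatMap (fun d => List.replicate (D.count d) d))
      = (([0,1,2,3,4,5,6,7,8,9] : List Int).flatMap (fun d => List.replicate (D.count d) d)).reverse := by
  simp [List.flatMap_cons, List.reverse_append, List.reverse_replicate, List.append_assoc]

lemma sorted_eq_descB (D : List Int) (hD : ∀ d ∈ D, 0 ≤ d ∧ d ≤ 9) :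
    PySem.List.sorted D (fun x => x) true
      = ([9,8,7,6,5,4,3,2,1,0] : List Int).flatMap (fun d => List.replicate (D.count d) d) := by
  rw [descB_eq_reverse]
  rw [← List.reverse_reverse (PySem.List.sorted D (fun x => x) true)]
  congr 1
  apply PySem.List.eq_of_perm_of_pairwise_le_of_injective (fun x => x) (fun a b h => h)
  · exact ((PySem.List.sorted D (fun x => x) true).reverse_perm.trans
      (PySem.List.sorted_perm D _ _)).trans (ascB_perm D hD).symm
  · exact List.pairwise_reverse.mpr (PySem.List.sorted_pairwise_rev D _)
  · exact ascB_pairwise D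

lemma flatten_map_flatMap_replicate (l : List Int) (f : Int → List Char) (g : Int → Nat) :
    ((l.flatMap (fun d => List.replicate (g d) d)).map f).flatten
      = (l.map (fun d => (List.replicate (g d) (f d)).flatten)).flatten := by
  induction l with
  | nil => simp
  | cons d t ih => simp_all [List.map_replicate]

-- ===== VERDICT (by name: the statement is the Claim_ definition above) =====
theorem find_largest_multiple_spec : Claim_equal_find_largest_multiple := by
  intro N _ hPre
  unfold Spec_find_largest_multiple find_largest_multiple find_largest_multiple_alt
  have hD : ∀ d ∈ (PySem.Int.toChars N).map pvDVal, 0 ≤ d ∧ d ≤ 9 := by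
    intro d hd
    obtain ⟨c, hc, rfl⟩ := List.mem_map.mp hd
    exact pvDVal_bounds c (digits_isDigit N hPre c hc)
  set D := (PySem.Int.toChars N).map pvDVal with hDdef
  have hfold : (PySem.Int.toChars N).foldl (fun st c => pvStep st (pvDVal c))
      ((List.replicate 10 0 : List Int), (0 : Int)) = D.foldl pvStep (List.replicate 10 0, 0) :=
    (List.foldl_map).symm
  rw [hfold]
  set R := D.foldl pvStep ((List.replicate 10 0 : List Int), (0 : Int)) with hR
  obtain ⟨hlen, hcnt, htot⟩ := foldB_spec D hD (List.replicate 10 0) 0 (by simp)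
  rw [← hR] at hlen hcnt htot
  have hget : ∀ d : Int, 0 ≤ d → d ≤ 9 → PySem.List.pyGetD R.1 d 0 = (D.count d : Int) := by
    intro d h0 h9
    have hk := hcnt d.toNat (by omega)
    have hd' : ((d.toNat : Nat) : Int) = d := by omega
    rw [hd'] at hk
    rw [show (List.replicate 10 (0:Int)).getD d.toNat 0 = 0 by
      rw [List.getD_eq_getElem _ _ (by simp; omega)]; exact List.getElem_replicate _] at hk
    rw [zero_add] at hk
    rw [PySem.List.pyGetD_eq_getElem _ _ h0 (by rw [hlen]; omega)]
    rw [← List.getD_eq_getElem R.1 0 (show d.toNat < R.1.length by omega)]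
    exact hk
  have hcond : (PySem.List.pyGetD R.1 0 0 = 0 ∨ PySem.Int.mod R.2 3 ≠ 0)
      ↔ ((0 : Int) ∉ D ∨ PySem.Int.mod D.sum 3 ≠ 0) := by
    rw [hget 0 (by norm_num) (by norm_num), htot]
    simp [List.count_eq_zero]
  by_cases hA : (0 : Int) ∉ D ∨ PySem.Int.mod D.sum 3 ≠ 0
  · rw [if_pos hA, if_pos (hcond.mpr hA)]
  · rw [if_neg hA, if_neg (fun h => hA (hcond.mp h))]
    have hrange : PySem.List.pyRange 9 (-1) (-1) = ([9,8,7,6,5,4,3,2,1,0] : List Int) := by decide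
    have hstr : PySem.Chars.join [] ((PySem.List.sorted D (fun x => x) true).map PySem.Int.toChars)
        = PySem.Chars.join [] ((PySem.List.pyRange 9 (-1) (-1)).map
            (fun d => PySem.List.pyRepeat (PySem.Int.toChars d) (PySem.List.pyGetD R.1 d 0))) := by
      rw [hrange, sorted_eq_descB D hD, join_nil_flatten, join_nil_flatten,
        flatten_map_flatMap_replicate]
      congr 1
      apply List.map_congr_left
      intro d hd
      have hb : 0 ≤ d ∧ d ≤ 9 := by fin_cases hd <;> norm_num
      rw [hget d hb.1 hb.2]
      simp [PySem.List.pyRepeat]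
    simp only [hstr]
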